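-- pv_equiv track=rewrite | github.com/hanghu/AlgorithmPractice | StanfordAlgorithmSeries/cluster.py | gen_bit_masks
-- ===== SOURCE A (Python) =====
-- def gen_bit_masks(n_bits, n_diff_bits,
--                  passed_bit=None,
--                  cur_bit=None,
--                  cur_start=None,
--                  cur_end=None):
--
--     assert n_diff_bits >= 1
--     assert n_bits >= n_diff_bits
--
--     if passed_bit is None:
--         cur_bit    = 1
--         passed_bit = 0
--         cur_start  = 0
--         cur_end    = n_bits - n_diff_bits + 1
--
--     masks = []
--     if(cur_bit == n_diff_bits):
--         masks += [passed_bit | 1 << i for i in range(cur_start,cur_end)]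
--     else:
--         for i in range(cur_start,cur_end):
--             passing_bit = passed_bit | 1 << i
--             masks += gen_bit_masks(n_bits, n_diff_bits, passed_bit=passing_bit,
--                                    cur_bit=cur_bit+1, cur_start=i+1,cur_end=cur_end+1)
--     return masks
-- ===== SOURCE B (Python) =====
-- def gen_bit_masks(n_bits, n_diff_bits,
--                  passed_bit=None,
--                  cur_bit=None,
--                  cur_start=None,
--                  cur_end=None):
--
--     assert n_diff_bits >= 1
--     assert n_bits >= n_diff_bits
--
--     if passed_bit is None:
--         cur_bit = 1
--         passed_bit = 0
--         cur_start = 0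
--         cur_end = n_bits - n_diff_bits + 1
--
--     # breadth-first level expansion: a flat frontier of (mask, start, end)
--     # frames replaces A's depth-first recursion; order stays lexicographic.
--     frontier = [(passed_bit, cur_start, cur_end)]
--     for _ in range(n_diff_bits - cur_bit):
--         frontier = [(m | 1 << i, i + 1, e + 1)
--                     for m, s, e in frontier for i in range(s, e)]
--     return [m | 1 << i for m, s, e in frontier for i in range(s, e)]
-- ===== Notes on version B (the rewrite author's own statement) =====
-- stated objective: alternative
-- what changed: Replaces A's depth-first recursion (with recursion-state parameters threaded through calls) by an iterative breadth-first level expansion: a flat frontier of (mask, start, end) frames is expanded once per remaining level with a single comprehension, then the last level is emitted; the lexicographic order is preserved.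
-- outside the precondition, e.g. on gen_bit_masks(7, 7, 7, None, 2, 0): A returns [], B raises TypeError
import Mathlib
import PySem

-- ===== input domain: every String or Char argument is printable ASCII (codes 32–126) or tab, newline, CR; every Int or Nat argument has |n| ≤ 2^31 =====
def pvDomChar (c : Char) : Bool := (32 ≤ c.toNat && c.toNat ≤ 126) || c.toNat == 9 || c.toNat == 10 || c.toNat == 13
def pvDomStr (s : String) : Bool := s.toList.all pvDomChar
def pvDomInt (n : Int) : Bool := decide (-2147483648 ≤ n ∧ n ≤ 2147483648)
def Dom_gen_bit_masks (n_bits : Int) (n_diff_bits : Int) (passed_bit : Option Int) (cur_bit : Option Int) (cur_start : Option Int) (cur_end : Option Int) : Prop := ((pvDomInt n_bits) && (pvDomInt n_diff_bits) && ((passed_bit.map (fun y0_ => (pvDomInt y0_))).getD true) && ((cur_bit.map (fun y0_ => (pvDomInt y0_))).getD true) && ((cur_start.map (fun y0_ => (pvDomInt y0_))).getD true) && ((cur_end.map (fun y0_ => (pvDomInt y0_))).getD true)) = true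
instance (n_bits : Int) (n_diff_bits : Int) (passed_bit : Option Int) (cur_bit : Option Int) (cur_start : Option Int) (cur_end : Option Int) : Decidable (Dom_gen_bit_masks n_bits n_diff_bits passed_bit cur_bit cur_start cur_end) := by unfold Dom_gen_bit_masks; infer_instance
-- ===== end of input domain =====

-- B replaces A's depth-first recursion by an iterative breadth-first level expansion over a flat frontier; same masks in the same lexicographic order.


-- ===== PORT A =====
-- A's recursion, with an explicit fuel parameter (the number of remaining levels,
-- (n_diff_bits - cur_bit).toNat at the top call) making the recursion total; on the
-- inputs Pre_ admits the fuel is never exhausted, so the Python is ported step for step.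
-- '1 << i' is ported as '(1 : Int) <<< i.toNat' (exact for 0 ≤ i; Python raises for i < 0,
-- and Pre_ excludes every input whose loops reach a negative i).
def genAuxA (n_bits n_diff_bits : Int) : Nat → Int → Int → Int → Int → List Int
  | fuel, passed_bit, cur_bit, cur_start, cur_end =>
    if cur_bit = n_diff_bits then
      (PySem.List.pyRange cur_start cur_end 1).map
        (fun i => PySem.Int.bor passed_bit ((1 : Int) <<< i.toNat))
    else
      match fuel with
      | 0 => []
      | f + 1 =>
        (PySem.List.pyRange cur_start cur_end 1).foldl
          (fun masks i =>
            masks ++ genAuxA n_bits n_diff_bits f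
              (PySem.Int.bor passed_bit ((1 : Int) <<< i.toNat))
              (cur_bit + 1) (i + 1) (cur_end + 1)) []

def gen_bit_masks (n_bits : Int) (n_diff_bits : Int) (passed_bit : Option Int) (cur_bit : Option Int) (cur_start : Option Int) (cur_end : Option Int) : List Int :=
  match passed_bit with
  | none => genAuxA n_bits n_diff_bits ((n_diff_bits - 1).toNat) 0 1 0 (n_bits - n_diff_bits + 1)
  | some p => genAuxA n_bits n_diff_bits ((n_diff_bits - cur_bit.getD 0).toNat) p
      (cur_bit.getD 0) (cur_start.getD 0) (cur_end.getD 0)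

-- ===== PORT B =====
-- frontier frame = (mask, start, end); one level of expansion (B's inner comprehension)
def stepB (frontier : List (Int × Int × Int)) : List (Int × Int × Int) :=
  frontier.flatMap (fun fr =>
    (PySem.List.pyRange fr.2.1 fr.2.2 1).map
      (fun i => (PySem.Int.bor fr.1 ((1 : Int) <<< i.toNat), i + 1, fr.2.2 + 1)))

-- B's final comprehension on one frame
def leafB (fr : Int × Int × Int) : List Int :=
  (PySem.List.pyRange fr.2.1 fr.2.2 1).map
    (fun i => PySem.Int.bor fr.1 ((1 : Int) <<< i.toNat))

def gen_bit_masks_alt (n_bits : Int) (n_diff_bits : Int) (passed_bit : Option Int) (cur_bit : Option Int) (cur_start : Option Int) (cur_end : Option Int) : List Int :=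
  let st : Int × Int × Int × Int :=
    match passed_bit with
    | none => (0, 1, 0, n_bits - n_diff_bits + 1)
    | some p => (p, cur_bit.getD 0, cur_start.getD 0, cur_end.getD 0)
  (((List.range ((n_diff_bits - st.2.1).toNat)).foldl (fun fr _ => stepB fr)
      [(st.1, st.2.2.1, st.2.2.2)])).flatMap leafB

-- ===== PRECONDITION & SPEC =====
-- Pre_ admits exactly the inputs on which the Python A returns: it excludes only inputs
-- where A raises — assert failures, a non-None passed_bit with missing recursion-state
-- arguments (TypeError on range(None, ...)), a reachable negative shift count
-- (ValueError on 1 << i with i < 0), and cur_bit > n_diff_bits with a nonempty range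
-- (unbounded recursion, RecursionError) — plus the corner passed_bit given but cur_bit
-- None with an empty range, where A returns [] before ever touching cur_bit while B's
-- level-count arithmetic (n_diff_bits - cur_bit) needs cur_bit and raises TypeError.
def Pre_gen_bit_masks (n_bits : Int) (n_diff_bits : Int) (passed_bit : Option Int) (cur_bit : Option Int) (cur_start : Option Int) (cur_end : Option Int) : Prop :=
  1 ≤ n_diff_bits ∧ n_diff_bits ≤ n_bits ∧
  (passed_bit.isSome = true →
    cur_bit.isSome = true ∧ cur_start.isSome = true ∧ cur_end.isSome = true ∧
    (cur_end.getD 0 ≤ cur_start.getD 0 ∨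
      (0 ≤ cur_start.getD 0 ∧ cur_bit.getD 0 ≤ n_diff_bits)))
instance (n_bits : Int) (n_diff_bits : Int) (passed_bit : Option Int) (cur_bit : Option Int) (cur_start : Option Int) (cur_end : Option Int) : Decidable (Pre_gen_bit_masks n_bits n_diff_bits passed_bit cur_bit cur_start cur_end) := by unfold Pre_gen_bit_masks; infer_instance

def pvWitness_gen_bit_masks : Int × Int × Option Int × Option Int × Option Int × Option Int :=
  (3, 2, none, none, none, none)

def Spec_gen_bit_masks (n_bits : Int) (n_diff_bits : Int) (passed_bit : Option Int) (cur_bit : Option Int) (cur_start : Option Int) (cur_end : Option Int) (out : List Int) : Prop := out = gen_bit_masks_alt n_bits n_diff_bits passed_bit cur_bit cur_start cur_end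
instance (n_bits : Int) (n_diff_bits : Int) (passed_bit : Option Int) (cur_bit : Option Int) (cur_start : Option Int) (cur_end : Option Int) (out : List Int) : Decidable (Spec_gen_bit_masks n_bits n_diff_bits passed_bit cur_bit cur_start cur_end out) := by unfold Spec_gen_bit_masks; infer_instance

-- ===== CLAIM (what is proved, stated in full; the proofs are below) =====
def Claim_equal_gen_bit_masks : Prop := ∀ (n_bits : Int) (n_diff_bits : Int) (passed_bit : Option Int) (cur_bit : Option Int) (cur_start : Option Int) (cur_end : Option Int), Dom_gen_bit_masks n_bits n_diff_bits passed_bit cur_bit cur_start cur_end → Pre_gen_bit_masks n_bits n_diff_bits passed_bit cur_bit cur_start cur_end → Spec_gen_bit_masks n_bits n_diff_bits passed_bit cur_bit cur_start cur_end (gen_bit_masks n_bits n_diff_bits passed_bit cur_bit cur_start cur_end)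
-- ===== LEMMAS AND PROOFS =====

-- iterating B's expansion distributes over the frontier elementwise
lemma stepB_flat (xs : List (Int × Int × Int)) :
    stepB xs = xs.flatMap (fun x => stepB [x]) := by
  simp [stepB]

lemma iter_singleton_flat : ∀ (f : Nat) (xs : List (Int × Int × Int)),
    (List.range f).foldl (fun fr _ => stepB fr) xs
      = xs.flatMap (fun x => (List.range f).foldl (fun fr _ => stepB fr) [x]) := by
  intro f
  induction f with
  | zero => intro xs; simp
  | succ f ih =>
    intro xs
    simp only [List.range_succ_eq_map, List.foldl_cons, List.foldl_map]
    rw [ih (stepB xs), stepB_flat xs, List.flatMap_assoc]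
    congr 1; funext x
    rw [← ih (stepB [x])]

-- A's recursion at cur_bit with 'fuel' remaining levels equals 'fuel' breadth-first
-- expansions of a single frame, followed by B's leaf emission.
lemma genAuxA_eq_levels (n_bits n_diff_bits : Int) :
    ∀ (fuel : Nat) (m cb cs ce : Int), cb + (fuel : Int) = n_diff_bits →
      genAuxA n_bits n_diff_bits fuel m cb cs ce
        = ((List.range fuel).foldl (fun fr _ => stepB fr) [(m, cs, ce)]).flatMap leafB := by
  intro fuel
  induction fuel with
  | zero =>
    intro m cb cs ce h
    have hcb : cb = n_diff_bits := by omega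
    simp [genAuxA, hcb, leafB]
  | succ f ih =>
    intro m cb cs ce h
    have hcb : ¬ cb = n_diff_bits := by omega
    simp only [genAuxA, hcb, if_false]
    rw [PySem.List.foldl_append_eq_flatMap]
    simp only [List.nil_append, List.range_succ_eq_map, List.foldl_cons, List.foldl_map]
    have hstep : stepB [(m, cs, ce)]
        = (PySem.List.pyRange cs ce 1).map
            (fun i => (PySem.Int.bor m ((1 : Int) <<< i.toNat), i + 1, ce + 1)) := by
      simp [stepB]
    rw [iter_singleton_flat f (stepB [(m, cs, ce)]), hstep, List.flatMap_map,
      List.flatMap_assoc]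
    congr 1; funext i
    exact ih _ (cb + 1) (i + 1) (ce + 1) (by omega)

-- ===== VERDICT (by name: the statement is the Claim_ definition above) =====
theorem gen_bit_masks_spec : Claim_equal_gen_bit_masks := by
  intro nb nd pb cb cs ce _ hpre
  obtain ⟨h1, h2, h3⟩ := hpre
  unfold Spec_gen_bit_masks gen_bit_masks gen_bit_masks_alt
  cases pb with
  | none =>
    simp only
    rw [genAuxA_eq_levels nb nd ((nd - 1).toNat) 0 1 0 (nb - nd + 1) (by omega)]
  | some p =>
    obtain ⟨_, _, _, hdisj⟩ := h3 rfl
    simp only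
    by_cases hle : cb.getD 0 ≤ nd
    · rw [genAuxA_eq_levels nb nd ((nd - cb.getD 0).toNat) p (cb.getD 0) (cs.getD 0)
        (ce.getD 0) (by omega)]
    · have hce : ce.getD 0 ≤ cs.getD 0 := by omega
      have hf : (nd - cb.getD 0).toNat = 0 := by omega
      have hne : ¬ cb.getD 0 = nd := by omega
      simp [genAuxA, hf, hne, leafB, PySem.List.pyRange_one_eq_nil hce]
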